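-- pv_equiv track=rewrite | github.com/dhanushkunchakuri/Proceduress | Testinggggg/app.py | expand_proc_sql
-- ===== SOURCE A (Python) =====
-- def expand_proc_sql(proc_name: str, procs: dict, calls_map: dict, visited=None):
--     """Return the proc SQL plus the SQL of all callee procs recursively (expanded components)."""
--     if visited is None:
--         visited = set()
--     if proc_name in visited:
--         return ""  # avoid cycles
--     visited.add(proc_name)
--     base = procs.get(proc_name, "")
--     parts = [base]
--     for callee in calls_map.get(proc_name, []):
--         parts.append("\n\n-- Expanded from: " + callee + "\n" + expand_proc_sql(callee, procs, calls_map, visited))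
--     return "\n".join(parts)
-- ===== SOURCE B (Python) =====
-- def expand_proc_sql(proc_name: str, procs: dict, calls_map: dict, visited=None):
--     """Iterative DFS with an explicit stack of frames (same result as the recursive version)."""
--     if visited is None:
--         visited = set()
--     if proc_name in visited:
--         return ""  # avoid cycles
--     visited.add(proc_name)
--     stack = [[proc_name, [procs.get(proc_name, "")], list(calls_map.get(proc_name, []))]]
--     result = ""
--     while stack:
--         name, parts, callees = stack[-1]
--         if callees:
--             c = callees.pop(0)
--             if c in visited:
--                 parts.append("\n\n-- Expanded from: " + c + "\n")
--             else:
--                 visited.add(c)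
--                 stack.append([c, [procs.get(c, "")], list(calls_map.get(c, []))])
--         else:
--             stack.pop()
--             res = "\n".join(parts)
--             if stack:
--                 stack[-1][1].append("\n\n-- Expanded from: " + name + "\n" + res)
--             else:
--                 result = res
--     return result
-- ===== Notes on version B (the rewrite author's own statement) =====
-- stated objective: alternative
-- what changed: Replaces the recursive expansion by an iterative depth-first traversal over an explicit stack of frames (name, collected parts, remaining callees), joining a frame's parts and attaching the wrapped result to its parent frame when its callees are exhausted, while keeping the same preorder visited-marking.
import Mathlib
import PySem

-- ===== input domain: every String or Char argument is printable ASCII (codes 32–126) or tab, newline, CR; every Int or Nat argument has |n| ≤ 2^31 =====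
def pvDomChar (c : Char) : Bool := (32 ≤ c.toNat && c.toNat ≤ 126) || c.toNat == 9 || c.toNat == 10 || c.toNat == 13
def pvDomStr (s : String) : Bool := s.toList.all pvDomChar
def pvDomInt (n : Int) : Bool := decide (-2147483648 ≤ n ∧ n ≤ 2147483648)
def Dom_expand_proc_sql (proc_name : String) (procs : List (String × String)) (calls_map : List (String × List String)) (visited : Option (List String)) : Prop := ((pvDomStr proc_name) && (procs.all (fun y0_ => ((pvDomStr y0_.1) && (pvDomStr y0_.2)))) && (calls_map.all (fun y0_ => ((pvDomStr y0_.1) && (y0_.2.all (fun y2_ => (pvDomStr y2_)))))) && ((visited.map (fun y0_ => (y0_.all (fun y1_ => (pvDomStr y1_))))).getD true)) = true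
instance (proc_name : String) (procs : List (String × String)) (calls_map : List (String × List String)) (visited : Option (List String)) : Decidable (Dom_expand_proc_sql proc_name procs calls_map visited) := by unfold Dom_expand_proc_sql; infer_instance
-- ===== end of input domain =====

-- B replaces A's recursion by an iterative DFS over an explicit stack of frames (alternative
-- decomposition, same cost); equivalence proved for the RETURN value — both versions also add the
-- same names to a caller-supplied `visited` set in the same preorder.

-- ===== PORT A =====
-- the wrapper string both versions build
def pvWrap (c r : String) : String := "\n\n-- Expanded from: " ++ c ++ "\n" ++ r

-- termination helpers (cited by name in the ports' decreasing_by)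
def pvF (calls_map : List (String × List String)) : List String := calls_map.flatMap Prod.snd

theorem pvMemAdd {x : String} {vis : List String} (name : String) (hx : x ∈ vis) :
    x ∈ PySem.Set.add vis name := by
  simp [PySem.Set.mem_add, hx]

theorem pvGetD_spec (C : List (String × List String)) (k : String) :
    PySem.Dict.getD (PySem.Dict.mk C) k [] = [] ∨
      ∃ p ∈ C, PySem.Dict.getD (PySem.Dict.mk C) k [] = p.2 := by
  unfold PySem.Dict.getD PySem.Dict.get?
  cases h : List.find? (fun p => p.1 == k) (PySem.Dict.mk C).items with
  | none => left; simp
  | some p => right; exact ⟨p, List.mem_of_find?_eq_some h, by simp⟩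

theorem pvLen_of_mem (C : List (String × List String)) (p : String × List String) (hp : p ∈ C) :
    p.2.length ≤ (pvF C).length := by
  induction C with
  | nil => simp at hp
  | cons q C' ih =>
    simp only [pvF, List.flatMap_cons, List.length_append]
    rcases List.mem_cons.mp hp with rfl | h
    · omega
    · have := ih h; simp only [pvF] at this; omega

theorem pvGetD_mem (C : List (String × List String)) (k x : String)
    (hx : x ∈ PySem.Dict.getD (PySem.Dict.mk C) k []) : x ∈ pvF C := by
  rcases pvGetD_spec C k with h | ⟨p, hp, h⟩
  · rw [h] at hx; simp at hx
  · rw [h] at hx; exact List.mem_flatMap.mpr ⟨p, hp, hx⟩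

theorem pvGetD_len (C : List (String × List String)) (k : String) :
    (PySem.Dict.getD (PySem.Dict.mk C) k []).length ≤ (pvF C).length := by
  rcases pvGetD_spec C k with h | ⟨p, hp, h⟩
  · simp [h]
  · rw [h]; exact pvLen_of_mem C p hp

theorem pvCard_mono {A₁ A₂ B₁ B₂ : Finset String} (hA : A₂ ⊆ A₁) (hB : B₁ ⊆ B₂) :
    (A₂ \ B₂).card ≤ (A₁ \ B₁).card :=
  Finset.card_le_card (Finset.sdiff_subset_sdiff hA hB)

theorem pvCard_strict {A₁ A₂ B₁ B₂ : Finset String} (c : String) (hcA : c ∈ A₁) (hcB : c ∉ B₁)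
    (hcB₂ : c ∈ B₂) (hA : A₂ ⊆ A₁) (hB : B₁ ⊆ B₂) :
    (A₂ \ B₂).card + 1 ≤ (A₁ \ B₁).card := by
  have hsub : A₂ \ B₂ ⊆ (A₁ \ B₁).erase c := by
    intro x hx
    rcases Finset.mem_sdiff.mp hx with ⟨hxA, hxB⟩
    refine Finset.mem_erase.mpr ⟨?_, Finset.mem_sdiff.mpr ⟨hA hxA, fun hc => hxB (hB hc)⟩⟩
    rintro rfl; exact hxB hcB₂
  have h1 : (A₂ \ B₂).card ≤ ((A₁ \ B₁).erase c).card := Finset.card_le_card hsub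
  have h2 : ((A₁ \ B₁).erase c).card = (A₁ \ B₁).card - 1 :=
    Finset.card_erase_of_mem (Finset.mem_sdiff.mpr ⟨hcA, hcB⟩)
  have h3 : 0 < (A₁ \ B₁).card :=
    Finset.card_pos.mpr ⟨c, Finset.mem_sdiff.mpr ⟨hcA, hcB⟩⟩
  omega

def pvUniA (calls_map : List (String × List String)) (l vis : List String) : Nat :=
  ((pvF calls_map ++ l).toFinset \ vis.toFinset).card

def pvW (calls_map : List (String × List String)) : Nat := (pvF calls_map).length + 2

theorem pvUniA_step (C : List (String × List String)) (name : String) (vis : List String)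
    (h : name ∉ vis) :
    pvUniA C (PySem.Dict.getD (PySem.Dict.mk C) name []) (PySem.Set.add vis name) + 1
      ≤ pvUniA C [name] vis := by
  refine pvCard_strict name ?_ ?_ ?_ ?_ ?_
  · simp
  · simp [h]
  · simp [PySem.Set.mem_add]
  · intro x hx
    simp only [List.mem_toFinset, List.mem_append] at hx ⊢
    rcases hx with hx | hx
    · exact Or.inl hx
    · exact Or.inl (pvGetD_mem C name x hx)
  · intro x hx
    simp only [List.mem_toFinset] at hx ⊢
    exact pvMemAdd name hx

theorem pvUniA_head (C : List (String × List String)) (c : String) (rest vis : List String) :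
    pvUniA C [c] vis ≤ pvUniA C (c :: rest) vis := by
  refine pvCard_mono ?_ (Finset.Subset.refl _)
  intro x hx
  simp only [List.mem_toFinset, List.mem_append, List.mem_cons] at hx ⊢
  tauto

theorem pvUniA_tail (C : List (String × List String)) (c : String) (rest : List String)
    {vis v1 : List String} (hv : ∀ x ∈ vis, x ∈ v1) :
    pvUniA C rest v1 ≤ pvUniA C (c :: rest) vis := by
  refine pvCard_mono ?_ ?_
  · intro x hx
    simp only [List.mem_toFinset, List.mem_append, List.mem_cons] at hx ⊢
    tauto
  · intro x hx
    simp only [List.mem_toFinset] at hx ⊢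
    exact hv x hx

-- A's recursive expansion: aVisit is expand_proc_sql's body, aFold its for-loop over the callees,
-- threading the (in Python mutable, shared) visited set; the subtype records that visited only grows.
mutual
def aVisit (procs : List (String × String)) (calls_map : List (String × List String))
    (name : String) (vis : List String) : String × {v : List String // ∀ x ∈ vis, x ∈ v} :=
  if h : name ∈ vis then ("", ⟨vis, fun _ hx => hx⟩)
  else
    let r := aFold procs calls_map (PySem.Dict.getD (PySem.Dict.mk calls_map) name [])
      (PySem.Set.add vis name)
    (PySem.Str.join "\n" (PySem.Dict.getD (PySem.Dict.mk procs) name "" :: r.1),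
     ⟨r.2.1, fun x hx => r.2.2 x (pvMemAdd name hx)⟩)
termination_by pvUniA calls_map [name] vis * pvW calls_map
decreasing_by
  have h1 := pvUniA_step calls_map name vis h
  have h2 := pvGetD_len calls_map name
  have hm := Nat.mul_le_mul_right (pvW calls_map) h1
  rw [Nat.add_mul, one_mul] at hm
  have hW : pvW calls_map = (pvF calls_map).length + 2 := rfl
  omega

def aFold (procs : List (String × String)) (calls_map : List (String × List String))
    (cs : List String) (vis : List String) : List String × {v : List String // ∀ x ∈ vis, x ∈ v} :=
  match cs with
  | [] => ([], ⟨vis, fun _ hx => hx⟩)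
  | c :: rest =>
    match aVisit procs calls_map c vis with
    | (s, ⟨v1, hv1⟩) =>
      match aFold procs calls_map rest v1 with
      | (ws, ⟨v2, hv2⟩) => (pvWrap c s :: ws, ⟨v2, fun x hx => hv2 x (hv1 x hx)⟩)
termination_by pvUniA calls_map cs vis * pvW calls_map + cs.length + 1
decreasing_by
  · have h1 := pvUniA_head calls_map c rest vis
    have hm := Nat.mul_le_mul_right (pvW calls_map) h1
    simp only [List.length_cons]
    omega
  · have h1 := pvUniA_tail calls_map c rest hv1
    have hm := Nat.mul_le_mul_right (pvW calls_map) h1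
    simp only [List.length_cons]
    omega
end

def expand_proc_sql (proc_name : String) (procs : List (String × String)) (calls_map : List (String × List String)) (visited : Option (List String)) : String :=
  let vis := match visited with
    | none => ([] : List String)
    | some v => v
  (aVisit procs calls_map proc_name vis).1

-- ===== PORT B =====
-- termination measure for the while loop
def pvSig (stack : List (String × List String × List String)) : Nat :=
  (stack.map (fun f => f.2.2.length)).sum

def pvUniR (calls_map : List (String × List String))
    (stack : List (String × List String × List String)) (vis : List String) : Nat :=
  ((pvF calls_map ++ stack.flatMap (fun f => f.2.2)).toFinset \ vis.toFinset).card

def pvPhi (calls_map : List (String × List String))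
    (stack : List (String × List String × List String)) (vis : List String) : Nat :=
  pvUniR calls_map stack vis * ((pvF calls_map).length + 1) + pvSig stack + stack.length

theorem pvPhi_skip (C : List (String × List String)) {vis v2 : List String}
    (hv : ∀ x ∈ vis, x ∈ v2) (name : String) (parts parts' cs : List String) (c : String)
    (rest : List (String × List String × List String)) :
    pvPhi C ((name, parts', cs) :: rest) v2 < pvPhi C ((name, parts, c :: cs) :: rest) vis := by
  have h1 : pvUniR C ((name, parts', cs) :: rest) v2
      ≤ pvUniR C ((name, parts, c :: cs) :: rest) vis := by
    refine pvCard_mono ?_ ?_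
    · intro x hx
      simp only [List.mem_toFinset, List.mem_append, List.flatMap_cons, List.mem_cons] at hx ⊢
      tauto
    · intro x hx
      simp only [List.mem_toFinset] at hx ⊢
      exact hv x hx
  have hm := Nat.mul_le_mul_right ((pvF C).length + 1) h1
  simp only [pvPhi, pvSig, List.map_cons, List.sum_cons, List.length_cons]
  omega

theorem pvPhi_push (C : List (String × List String)) (c : String) {vis : List String}
    (hc : c ∉ vis) (bp : List String) (name : String) (parts cs : List String)
    (rest : List (String × List String × List String)) :
    pvPhi C ((c, bp, PySem.Dict.getD (PySem.Dict.mk C) c []) :: (name, parts, cs) :: rest)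
        (PySem.Set.add vis c)
      < pvPhi C ((name, parts, c :: cs) :: rest) vis := by
  have h1 : pvUniR C ((c, bp, PySem.Dict.getD (PySem.Dict.mk C) c []) :: (name, parts, cs) :: rest)
        (PySem.Set.add vis c) + 1
      ≤ pvUniR C ((name, parts, c :: cs) :: rest) vis := by
    refine pvCard_strict c ?_ ?_ ?_ ?_ ?_
    · simp
    · simp [hc]
    · simp [PySem.Set.mem_add]
    · intro x hx
      simp only [List.mem_toFinset, List.mem_append, List.flatMap_cons, List.mem_cons] at hx ⊢
      rcases hx with hx | hx
      · exact Or.inl hx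
      · rcases hx with hx | hx
        · exact Or.inl (pvGetD_mem C c x hx)
        · tauto
    · intro x hx
      simp only [List.mem_toFinset] at hx ⊢
      exact pvMemAdd c hx
  have h2 := pvGetD_len C c
  have hm := Nat.mul_le_mul_right ((pvF C).length + 1) h1
  rw [Nat.add_mul, one_mul] at hm
  simp only [pvPhi, pvSig, List.map_cons, List.sum_cons, List.length_cons]
  omega

theorem pvPhi_pop (C : List (String × List String)) (name pn : String)
    (parts pp pp' pcs : List String) (rest' : List (String × List String × List String))
    (vis : List String) :
    pvPhi C ((pn, pp', pcs) :: rest') vis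
      < pvPhi C ((name, parts, []) :: (pn, pp, pcs) :: rest') vis := by
  have h1 : pvUniR C ((pn, pp', pcs) :: rest') vis
      = pvUniR C ((name, parts, []) :: (pn, pp, pcs) :: rest') vis := by
    simp [pvUniR]
  simp only [pvPhi, pvSig, List.map_cons, List.sum_cons, List.length_cons, h1]
  omega

-- the while loop of Source B: each frame is (name, parts, remaining callees)
def runB (procs : List (String × String)) (calls_map : List (String × List String)) :
    List (String × List String × List String) → List String → String
  | [], _ => ""
  | (name, parts, c :: cs) :: rest, vis =>
    if hc : c ∈ vis then
      runB procs calls_map ((name, parts ++ ["\n\n-- Expanded from: " ++ c ++ "\n"], cs) :: rest) vis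
    else
      runB procs calls_map
        ((c, [PySem.Dict.getD (PySem.Dict.mk procs) c ""],
            PySem.Dict.getD (PySem.Dict.mk calls_map) c []) :: (name, parts, cs) :: rest)
        (PySem.Set.add vis c)
  | [(_name, parts, [])], _ => PySem.Str.join "\n" parts
  | (name, parts, []) :: (pn, pp, pcs) :: rest', vis =>
    runB procs calls_map
      ((pn, pp ++ [pvWrap name (PySem.Str.join "\n" parts)], pcs) :: rest') vis
termination_by stack vis => pvPhi calls_map stack vis
decreasing_by
  · exact pvPhi_skip calls_map (fun _ hx => hx) name parts _ cs c rest
  · exact pvPhi_push calls_map c hc _ name parts cs rest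
  · exact pvPhi_pop calls_map name pn parts pp _ pcs rest' vis

def expand_proc_sql_alt (proc_name : String) (procs : List (String × String)) (calls_map : List (String × List String)) (visited : Option (List String)) : String :=
  let vis := match visited with
    | none => ([] : List String)
    | some v => v
  if proc_name ∈ vis then ""
  else
    runB procs calls_map
      [(proc_name, [PySem.Dict.getD (PySem.Dict.mk procs) proc_name ""],
          PySem.Dict.getD (PySem.Dict.mk calls_map) proc_name [])]
      (PySem.Set.add vis proc_name)

-- ===== PRECONDITION & SPEC =====
def Spec_expand_proc_sql (proc_name : String) (procs : List (String × String)) (calls_map : List (String × List String)) (visited : Option (List String)) (out : String) : Prop := out = expand_proc_sql_alt proc_name procs calls_map visited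
instance (proc_name : String) (procs : List (String × String)) (calls_map : List (String × List String)) (visited : Option (List String)) (out : String) : Decidable (Spec_expand_proc_sql proc_name procs calls_map visited out) := by unfold Spec_expand_proc_sql; infer_instance

-- ===== CLAIM (what is proved, stated in full; the proofs are below) =====
def Claim_equal_expand_proc_sql : Prop := ∀ (proc_name : String) (procs : List (String × String)) (calls_map : List (String × List String)) (visited : Option (List String)), Dom_expand_proc_sql proc_name procs calls_map visited → Spec_expand_proc_sql proc_name procs calls_map visited (expand_proc_sql proc_name procs calls_map visited)

-- ===== LEMMAS AND PROOFS =====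

-- small-step characterisations of A's pair of functions
theorem aFold_nil (P : List (String × String)) (C : List (String × List String))
    (vis : List String) : aFold P C [] vis = ([], ⟨vis, fun _ hx => hx⟩) := by
  simp [aFold]

theorem aVisit_pos (P : List (String × String)) (C : List (String × List String))
    (c : String) (vis : List String) (hc : c ∈ vis) :
    aVisit P C c vis = ("", ⟨vis, fun _ hx => hx⟩) := by
  rw [aVisit, dif_pos hc]

theorem aVisit_neg_fst (P : List (String × String)) (C : List (String × List String))
    (c : String) (vis : List String) (hc : c ∉ vis) :
    (aVisit P C c vis).1 = PySem.Str.join "\n"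
      (PySem.Dict.getD (PySem.Dict.mk P) c ""
        :: (aFold P C (PySem.Dict.getD (PySem.Dict.mk C) c []) (PySem.Set.add vis c)).1) := by
  rw [aVisit, dif_neg hc]

theorem aVisit_neg_snd (P : List (String × String)) (C : List (String × List String))
    (c : String) (vis : List String) (hc : c ∉ vis) :
    (aVisit P C c vis).2.1
      = (aFold P C (PySem.Dict.getD (PySem.Dict.mk C) c []) (PySem.Set.add vis c)).2.1 := by
  rw [aVisit, dif_neg hc]

theorem aFold_cons_fst (P : List (String × String)) (C : List (String × List String))
    (c : String) (cs vis : List String) :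
    (aFold P C (c :: cs) vis).1
      = pvWrap c (aVisit P C c vis).1 :: (aFold P C cs (aVisit P C c vis).2.1).1 := by
  rcases h1 : aVisit P C c vis with ⟨s, v1, hv1⟩
  rcases h2 : aFold P C cs v1 with ⟨ws, v2, hv2⟩
  simp only [aFold, h1]
  rw [h1]
  simp [h2]

theorem aFold_cons_snd (P : List (String × String)) (C : List (String × List String))
    (c : String) (cs vis : List String) :
    (aFold P C (c :: cs) vis).2.1 = (aFold P C cs (aVisit P C c vis).2.1).2.1 := by
  rcases h1 : aVisit P C c vis with ⟨s, v1, hv1⟩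
  rcases h2 : aFold P C cs v1 with ⟨ws, v2, hv2⟩
  simp only [aFold, h1]
  rw [h1]
  simp [h2]

-- what the machine does after the top frame is finished
def pvFinish (P : List (String × String)) (C : List (String × List String))
    (rest : List (String × List String × List String)) (name res : String)
    (vis : List String) : String :=
  match rest with
  | [] => res
  | (pn, pp, pcs) :: rest' => runB P C ((pn, pp ++ [pvWrap name res], pcs) :: rest') vis

-- main invariant: the machine evaluates the top frame exactly as A's callee fold does
theorem run_fold (P : List (String × String)) (C : List (String × List String)) :
    ∀ (n : Nat) (vis : List String) (name : String) (parts cs : List String)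
      (rest : List (String × List String × List String)),
      pvPhi C ((name, parts, cs) :: rest) vis ≤ n →
      runB P C ((name, parts, cs) :: rest) vis
        = pvFinish P C rest name
            (PySem.Str.join "\n" (parts ++ (aFold P C cs vis).1)) (aFold P C cs vis).2.1 := by
  intro n
  induction n with
  | zero =>
    intro vis name parts cs rest hφ
    exfalso
    simp only [pvPhi, List.length_cons] at hφ
    omega
  | succ n ih =>
    intro vis name parts cs rest hφ
    match cs with
    | [] =>
      rw [aFold_nil]
      match rest with
      | [] => simp [runB, pvFinish]
      | (pn, pp, pcs) :: rest' => simp [runB, pvFinish]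
    | c :: cs' =>
      by_cases hc : c ∈ vis
      · -- visited callee: the machine appends the bare wrapper
        rw [runB, dif_pos hc]
        have hφ' : pvPhi C ((name, parts ++ ["\n\n-- Expanded from: " ++ c ++ "\n"], cs') :: rest) vis ≤ n := by
          have := pvPhi_skip C (vis := vis) (v2 := vis) (fun _ hx => hx) name parts
            (parts ++ ["\n\n-- Expanded from: " ++ c ++ "\n"]) cs' c rest
          omega
        rw [ih vis name _ cs' rest hφ']
        rw [aFold_cons_fst, aFold_cons_snd, aVisit_pos P C c vis hc]
        have hwrap : pvWrap c "" = "\n\n-- Expanded from: " ++ c ++ "\n" := by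
          simp [pvWrap]
        rw [hwrap]
        simp [List.append_assoc]
      · -- new callee: the machine pushes a frame for c
        rw [runB, dif_neg hc]
        have hφ₁ : pvPhi C ((c, [PySem.Dict.getD (PySem.Dict.mk P) c ""],
            PySem.Dict.getD (PySem.Dict.mk C) c []) :: (name, parts, cs') :: rest)
            (PySem.Set.add vis c) ≤ n := by
          have := pvPhi_push C c hc [PySem.Dict.getD (PySem.Dict.mk P) c ""] name parts cs' rest
          omega
        rw [ih _ c _ _ _ hφ₁]
        simp only [pvFinish]
        have hmono : ∀ x ∈ vis, x ∈ (aFold P C (PySem.Dict.getD (PySem.Dict.mk C) c [])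
            (PySem.Set.add vis c)).2.1 := fun x hx =>
          (aFold P C (PySem.Dict.getD (PySem.Dict.mk C) c [])
            (PySem.Set.add vis c)).2.2 x (pvMemAdd c hx)
        have hφ₂ : pvPhi C ((name, parts ++ [pvWrap c (PySem.Str.join "\n"
              ([PySem.Dict.getD (PySem.Dict.mk P) c ""]
                ++ (aFold P C (PySem.Dict.getD (PySem.Dict.mk C) c [])
                      (PySem.Set.add vis c)).1))], cs') :: rest)
            ((aFold P C (PySem.Dict.getD (PySem.Dict.mk C) c [])
                (PySem.Set.add vis c)).2.1) ≤ n := by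
          have := pvPhi_skip C hmono name parts (parts ++ [pvWrap c (PySem.Str.join "\n"
              ([PySem.Dict.getD (PySem.Dict.mk P) c ""]
                ++ (aFold P C (PySem.Dict.getD (PySem.Dict.mk C) c [])
                      (PySem.Set.add vis c)).1))]) cs' c rest
          omega
        rw [ih _ name _ cs' rest hφ₂]
        rw [aFold_cons_fst, aFold_cons_snd, aVisit_neg_fst P C c vis hc,
          aVisit_neg_snd P C c vis hc]
        simp only [List.append_assoc, List.cons_append, List.nil_append]
        simp only [pvFinish]

theorem expand_core (P : List (String × String)) (C : List (String × List String))
    (name : String) (vis : List String) :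
    (aVisit P C name vis).1 = if name ∈ vis then ""
      else runB P C [(name, [PySem.Dict.getD (PySem.Dict.mk P) name ""],
          PySem.Dict.getD (PySem.Dict.mk C) name [])] (PySem.Set.add vis name) := by
  by_cases h : name ∈ vis
  · rw [aVisit_pos P C name vis h, if_pos h]
  · rw [if_neg h, aVisit_neg_fst P C name vis h]
    rw [run_fold P C
      (pvPhi C [(name, [PySem.Dict.getD (PySem.Dict.mk P) name ""],
          PySem.Dict.getD (PySem.Dict.mk C) name [])] (PySem.Set.add vis name))
      _ _ _ _ _ (le_refl _)]
    simp [pvFinish]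

theorem expand_proc_sql_equiv (proc_name : String) (procs : List (String × String))
    (calls_map : List (String × List String)) (visited : Option (List String)) :
    expand_proc_sql proc_name procs calls_map visited
      = expand_proc_sql_alt proc_name procs calls_map visited := by
  cases visited with
  | none => exact expand_core procs calls_map proc_name []
  | some v => exact expand_core procs calls_map proc_name v

-- ===== VERDICT (by name: the statement is the Claim_ definition above) =====
theorem expand_proc_sql_spec : Claim_equal_expand_proc_sql := by
  intro proc_name procs calls_map visited _
  unfold Spec_expand_proc_sql
  exact expand_proc_sql_equiv proc_name procs calls_map visited
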